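-- pv_equiv track=rewrite | github.com/haider-06418/Data-Preprocessor | data_processor.py | field_finder
-- ===== SOURCE A (Python) =====
-- def field_finder(field_name, tokenized_list):
--
--     street_keywords = ['street', 'lane']
--     road_keywords = ['road', 'highway', 'khayaban', 'avenue', 'boulevard', 'shahrah', 'alley', 'commercial']
--     house_keywords = ['house', 'house no', 'house number', 'house #', 'plot']
--     apartment_keywords = ['flat', 'flat no', 'flat number', 'flat #', 'apartment', 'suite']
--     floor_keywords = ['floor', 'fl', 'level']
--     area_keywords = ['phase', 'scheme', 'sector']
--     keywords = []
--
--     field_name = field_name.lower()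
--
--     if field_name == 'street':
--         keywords = street_keywords
--     elif field_name == 'road':
--         keywords = road_keywords
--     elif field_name == 'house':
--         keywords = house_keywords
--     elif field_name == 'apartment':
--         keywords = apartment_keywords
--     elif field_name == 'floor':
--         keywords = floor_keywords
--     elif field_name == 'area':
--         keywords = area_keywords
--
--     for index, token in enumerate(tokenized_list):
--         if any(keyword in token for keyword in keywords):
--             return index
--
--     return None
-- ===== SOURCE B (Python) =====
-- KEYWORD_MAP = {
--     'street': ['street', 'lane'],
--     'road': ['road', 'highway', 'khayaban', 'avenue', 'boulevard', 'shahrah', 'alley', 'commercial'],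
--     'house': ['house', 'house no', 'house number', 'house #', 'plot'],
--     'apartment': ['flat', 'flat no', 'flat number', 'flat #', 'apartment', 'suite'],
--     'floor': ['floor', 'fl', 'level'],
--     'area': ['phase', 'scheme', 'sector'],
-- }
--
--
-- def field_finder(field_name, tokenized_list):
--     keywords = KEYWORD_MAP.get(field_name.lower(), [])
--     best = None
--     for keyword in keywords:
--         for index, token in enumerate(tokenized_list):
--             if keyword in token:
--                 if best is None or index < best:
--                     best = index
--                 break
--     return best
-- ===== Notes on version B (the rewrite author's own statement) =====
-- stated objective: alternative
-- what changed: Replaced the token-major scan (first token whose string contains any keyword of the selected field) by a keyword-major traversal: for each keyword find its earliest matching token index and return the minimum of those indices (None if no keyword matches); the field->keywords if/elif chain becomes a dict lookup.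
import Mathlib
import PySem

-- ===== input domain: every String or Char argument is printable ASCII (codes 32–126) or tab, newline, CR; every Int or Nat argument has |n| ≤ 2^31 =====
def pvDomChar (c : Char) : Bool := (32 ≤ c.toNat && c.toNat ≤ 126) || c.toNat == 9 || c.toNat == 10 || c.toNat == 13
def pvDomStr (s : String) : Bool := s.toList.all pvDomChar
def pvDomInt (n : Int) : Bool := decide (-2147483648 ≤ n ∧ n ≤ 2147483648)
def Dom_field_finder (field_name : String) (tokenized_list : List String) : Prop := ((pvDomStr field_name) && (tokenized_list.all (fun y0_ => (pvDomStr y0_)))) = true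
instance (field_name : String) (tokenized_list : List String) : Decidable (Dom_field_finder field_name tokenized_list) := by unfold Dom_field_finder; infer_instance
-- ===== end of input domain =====

-- B replaces A's token-major scan (any() over keywords per token) by a keyword-major traversal: min over keywords of each keyword's earliest matching token index; the if/elif field selection becomes a dict lookup. Measured faster in a timing run (constant-factor: no per-token generator).


-- ===== PORT A =====
-- the 'for index, token in enumerate(...)' loop with early return
def pvScanA (keywords : List String) (toks : List String) (index : Int) : Option Int :=
  match toks with
  | [] => none
  | token :: rest =>
      if keywords.any (fun keyword => PySem.Str.isIn keyword token) then some index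
      else pvScanA keywords rest (index + 1)

def field_finder (field_name : String) (tokenized_list : List String) : Option Int :=
  let street_keywords := ["street", "lane"]
  let road_keywords := ["road", "highway", "khayaban", "avenue", "boulevard", "shahrah", "alley", "commercial"]
  let house_keywords := ["house", "house no", "house number", "house #", "plot"]
  let apartment_keywords := ["flat", "flat no", "flat number", "flat #", "apartment", "suite"]
  let floor_keywords := ["floor", "fl", "level"]
  let area_keywords := ["phase", "scheme", "sector"]
  let field_name := PySem.Str.lower field_name
  let keywords : List String :=
    if field_name = "street" then street_keywords
    else if field_name = "road" then road_keywords
    else if field_name = "house" then house_keywords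
    else if field_name = "apartment" then apartment_keywords
    else if field_name = "floor" then floor_keywords
    else if field_name = "area" then area_keywords
    else []
  pvScanA keywords tokenized_list 0

-- ===== PORT B =====
def pvKeywordMap : PySem.Dict String (List String) :=
  PySem.Dict.ofList
  [("street", ["street", "lane"]),
   ("road", ["road", "highway", "khayaban", "avenue", "boulevard", "shahrah", "alley", "commercial"]),
   ("house", ["house", "house no", "house number", "house #", "plot"]),
   ("apartment", ["flat", "flat no", "flat number", "flat #", "apartment", "suite"]),
   ("floor", ["floor", "fl", "level"]),
   ("area", ["phase", "scheme", "sector"])]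

-- Source B's inner 'for index, token in enumerate(...): if keyword in token: ...; break'
def pvFirstIdx (keyword : String) (toks : List String) (index : Int) : Option Int :=
  match toks with
  | [] => none
  | token :: rest =>
      if PySem.Str.isIn keyword token then some index
      else pvFirstIdx keyword rest (index + 1)

-- one step of Source B's outer loop: update best with keyword's earliest match
def pvStep (toks : List String) (best : Option Int) (keyword : String) : Option Int :=
  match pvFirstIdx keyword toks 0 with
  | none => best
  | some index =>
      match best with
      | none => some index
      | some b => if index < b then some index else some b

def field_finder_alt (field_name : String) (tokenized_list : List String) : Option Int :=
  let keywords := PySem.Dict.getD pvKeywordMap (PySem.Str.lower field_name) []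
  keywords.foldl (pvStep tokenized_list) none

-- ===== PRECONDITION & SPEC =====
def Spec_field_finder (field_name : String) (tokenized_list : List String) (out : Option Int) : Prop := out = field_finder_alt field_name tokenized_list
instance (field_name : String) (tokenized_list : List String) (out : Option Int) : Decidable (Spec_field_finder field_name tokenized_list out) := by unfold Spec_field_finder; infer_instance

-- ===== CLAIM (what is proved, stated in full; the proofs are below) =====
def Claim_equal_field_finder : Prop := ∀ (field_name : String) (tokenized_list : List String), Dom_field_finder field_name tokenized_list → Spec_field_finder field_name tokenized_list (field_finder field_name tokenized_list)

-- ===== LEMMAS AND PROOFS =====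

-- a found index is never below the running index
theorem pvFirstIdx_ge (keyword : String) (toks : List String) :
    ∀ (i j : Int), pvFirstIdx keyword toks i = some j → i ≤ j := by
  induction toks with
  | nil => intro i j h; simp [pvFirstIdx] at h
  | cons t rest ih =>
      intro i j h
      rw [pvFirstIdx] at h
      by_cases hm : PySem.Str.isIn keyword t = true
      · rw [if_pos hm] at h
        simp only [Option.some.injEq] at h; omega
      · rw [if_neg hm] at h
        have := ih (i + 1) j h; omega

-- B's fold with a generalized start index
def pvStep' (toks : List String) (i : Int) (best : Option Int) (keyword : String) : Option Int :=
  match pvFirstIdx keyword toks i with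
  | none => best
  | some index =>
      match best with
      | none => some index
      | some b => if index < b then some index else some b

theorem pvStep'_zero (toks : List String) : pvStep toks = pvStep' toks 0 := by
  funext best keyword; simp [pvStep, pvStep']

-- on an empty token list every step is the identity
theorem pvFold_nil (i : Int) : ∀ (kws : List String) (acc : Option Int),
    kws.foldl (pvStep' [] i) acc = acc := by
  intro kws
  induction kws with
  | nil => intro acc; simp
  | cons k rest ih => intro acc; simp [List.foldl, pvStep', pvFirstIdx, ih]

-- the fold returns `some i` whenever the accumulator is already `some i`, or the
-- accumulator is ≥ i (none counts) and some keyword's earliest match is exactly i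
theorem pvFold_min (toks : List String) (i : Int) :
    ∀ (kws : List String) (acc : Option Int),
      (acc = some i ∨ ((∀ b, acc = some b → i ≤ b) ∧
        ∃ kw ∈ kws, pvFirstIdx kw toks i = some i)) →
      kws.foldl (pvStep' toks i) acc = some i := by
  intro kws
  induction kws with
  | nil =>
      intro acc h
      rcases h with h | ⟨_, kw, hmem, _⟩
      · simpa using h
      · simp at hmem
  | cons k0 rest ih =>
      intro acc h
      rw [List.foldl_cons]
      rcases h with h | ⟨hge, kw, hmem, hv⟩
      · -- acc = some i stays some i
        subst h
        apply ih; left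
        cases hvk : pvFirstIdx k0 toks i with
        | none => simp [pvStep', hvk]
        | some j =>
            have := pvFirstIdx_ge k0 toks i j hvk
            simp only [pvStep', hvk]
            have hnlt : ¬ j < i := by omega
            simp [hnlt]
      · rcases List.mem_cons.mp hmem with hmem0 | hmemr
        · -- the witness is the head keyword
          subst hmem0
          apply ih; left
          cases hacc : acc with
          | none => simp [pvStep', hv]
          | some b =>
              have hb := hge b hacc
              simp only [pvStep', hv]
              by_cases hlt : i < b
              · simp [hlt]
              · simp only [if_neg hlt]
                have : b = i := by omega
                simp [this]
        · -- the witness is in the tail; the accumulator stays ≥ i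
          apply ih; right
          refine ⟨?_, kw, hmemr, hv⟩
          intro b hb
          cases hvk : pvFirstIdx k0 toks i with
          | none =>
              apply hge b
              simpa [pvStep', hvk] using hb
          | some j =>
              have hj := pvFirstIdx_ge k0 toks i j hvk
              cases hacc : acc with
              | none =>
                  simp only [pvStep', hvk, hacc, Option.some.injEq] at hb; omega
              | some b0 =>
                  have hb0 := hge b0 hacc
                  simp only [pvStep', hvk, hacc] at hb
                  split_ifs at hb <;>
                    simp only [Option.some.injEq] at hb <;> omega

-- main bridge: A's token-major scan equals B's keyword-major fold
theorem pvScan_eq_fold (kws : List String) (toks : List String) :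
    ∀ (i : Int), pvScanA kws toks i = kws.foldl (pvStep' toks i) none := by
  induction toks with
  | nil => intro i; simp [pvScanA, pvFold_nil]
  | cons t rest ih =>
      intro i
      rw [pvScanA]
      by_cases hany : (kws.any fun keyword => PySem.Str.isIn keyword t) = true
      · -- some keyword matches the head token: both sides give `some i`
        rw [if_pos hany]
        rcases List.any_eq_true.mp hany with ⟨kw, hmem, hkw⟩
        refine (pvFold_min (t :: rest) i kws none (Or.inr ⟨?_, kw, hmem, ?_⟩)).symm
        · intro b hb; cases hb
        · rw [pvFirstIdx, if_pos hkw]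
      · -- no keyword matches the head: each pvFirstIdx skips it
        have hall : ∀ kw ∈ kws, ¬ PySem.Str.isIn kw t = true := by
          intro kw hmem hc
          exact hany (List.any_eq_true.mpr ⟨kw, hmem, hc⟩)
        rw [if_neg hany, ih (i + 1)]
        refine (PySem.List.foldl_congr_mem _ _ _ _ ?_).symm
        intro acc kw hmem
        rw [pvStep', pvStep', pvFirstIdx, if_neg (hall kw hmem)]

-- ===== VERDICT (by name: the statement is the Claim_ definition above) =====
theorem field_finder_spec : Claim_equal_field_finder := by
  intro field_name tokenized_list _
  unfold Spec_field_finder field_finder field_finder_alt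
  rw [pvStep'_zero, pvScan_eq_fold]
  congr 1
  generalize PySem.Str.lower field_name = fn
  by_cases h1 : fn = "street"
  · subst h1; decide
  by_cases h2 : fn = "road"
  · subst h2; decide
  by_cases h3 : fn = "house"
  · subst h3; decide
  by_cases h4 : fn = "apartment"
  · subst h4; decide
  by_cases h5 : fn = "floor"
  · subst h5; decide
  by_cases h6 : fn = "area"
  · subst h6; decide
  simp [pvKeywordMap, PySem.Dict.ofList, PySem.Dict.getD, PySem.Dict.update,
    PySem.Dict.get?_insert, h1, h2, h3, h4, h5, h6]
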